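-- pv_equiv track=rewrite | github.com/myejin/ALGO_STUDY_123 | 그래프 탐색/이재희/Bkj_1941_소문난_칠공주_slow.py | adjacent_check
-- ===== SOURCE A (Python) =====
-- from collections import deque
--
-- def adjacent_check(student_lst):
--     # 처음 선택된 학생부터 bfs 탐색
--     sx, sy = student_lst[0]
--     checked = [[0]*5 for _ in range(5)]
--     checked[sx][sy] = 1
--     # 인접한 학생의 수 카운트
--     adjacent_student_cnt = 0
--     deq = deque([[sx, sy]])
--     while deq:
--         x, y = deq.popleft()
--         for d in range(4):
--             nx = x + dx[d]
--             ny = y + dy[d]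
--             # 선택된 학생이면서 체크하지 않았을 경우
--             if [nx, ny] in student_lst and not checked[nx][ny]:
--                 checked[nx][ny] = 1
--                 deq.append([nx, ny])
--                 adjacent_student_cnt += 1
--     # 인접한 학생이 6명(모두 인접)일 경우 True 반환
--     if adjacent_student_cnt >= 6:
--         return True
--     else:
--         return False
--
-- dx = (1, 0, -1, 0)
--
-- dy = (0, 1, 0, -1)
-- ===== SOURCE B (Python) =====
-- def adjacent_check(student_lst):
--     # fixpoint label propagation over the set of student coordinates (no queue, no 5x5 grid)
--     sx, sy = student_lst[0]
--     cells = {(s[0], s[1]) for s in student_lst if len(s) == 2}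
--     comp = {(sx, sy)}
--     for _ in range(len(student_lst)):
--         comp = comp | {c for c in cells
--                        if (c[0] + 1, c[1]) in comp or (c[0] - 1, c[1]) in comp
--                        or (c[0], c[1] + 1) in comp or (c[0], c[1] - 1) in comp}
--     return len(comp) >= 7
-- ===== Notes on version B (the rewrite author's own statement) =====
-- stated objective: alternative
-- what changed: Replaces the queue BFS over a 5x5 checked matrix (per-direction list membership scans, counting newly checked cells) by round-based label propagation over the set of student coordinate pairs: repeatedly union into the component every cell with a neighbour already in it, then test component size >= 7; …
-- outside the precondition, e.g. on adjacent_check([[0, 0], [-1, 0], [4, 0], [3, 0], [2, 0], [1, 0], [0, 1]]): A returns False, B returns True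
import Mathlib
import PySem

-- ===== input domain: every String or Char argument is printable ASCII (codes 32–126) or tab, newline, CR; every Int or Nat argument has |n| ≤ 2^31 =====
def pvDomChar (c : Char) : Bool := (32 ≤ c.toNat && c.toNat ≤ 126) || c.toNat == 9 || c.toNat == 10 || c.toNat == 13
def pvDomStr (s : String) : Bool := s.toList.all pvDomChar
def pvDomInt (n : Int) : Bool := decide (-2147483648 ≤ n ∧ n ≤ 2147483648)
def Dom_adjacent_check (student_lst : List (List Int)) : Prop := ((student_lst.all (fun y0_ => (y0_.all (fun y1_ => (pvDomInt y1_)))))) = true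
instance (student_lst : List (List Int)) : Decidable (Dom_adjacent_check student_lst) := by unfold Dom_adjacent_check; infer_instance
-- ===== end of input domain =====

-- B replaces A's queue BFS over a 5x5 checked matrix by round-based label propagation over the
-- set of student coordinates (alternative decomposition, similar cost; return value only).

-- ===== PORT A =====
def dxA : List Int := [1, 0, -1, 0]
def dyA : List Int := [0, 1, 0, -1]

-- checked[x][y] (exact for the in-grid indices reachable under Pre_)
def mget (M : List (List Int)) (x y : Int) : Int :=
  PySem.List.pyGetD (PySem.List.pyGetD M x []) y 0

-- checked[x][y] = 1 (exact for the in-grid indices reachable under Pre_)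
def msetOne (M : List (List Int)) (x y : Int) : List (List Int) :=
  PySem.List.pySetD M x (PySem.List.pySetD (PySem.List.pyGetD M x []) y 1)

-- body of 'for d in range(4)': state is (deq-after-popleft, checked, adjacent_student_cnt)
def stepDir (L : List (List Int)) (x y : Int)
    (st : List (Int × Int) × List (List Int) × Int) (d : Int) :
    List (Int × Int) × List (List Int) × Int :=
  let nx := x + PySem.List.pyGetD dxA d 0
  let ny := y + PySem.List.pyGetD dyA d 0
  if [nx, ny] ∈ L ∧ mget st.2.1 nx ny = 0 then
    (st.1 ++ [(nx, ny)], msetOne st.2.1 nx ny, st.2.2 + 1)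
  else st

-- 'while deq:' — fuel only makes the loop total; 26 always suffices under Pre_ (≤ 25 cells are ever enqueued)
def bfsLoop (L : List (List Int)) : Nat → List (Int × Int) → List (List Int) → Int → Int
  | 0, _, _, cnt => cnt
  | _ + 1, [], _, cnt => cnt
  | f + 1, (x, y) :: q, M, cnt =>
    let st := (PySem.List.pyRange 0 4 1).foldl (stepDir L x y) (q, M, cnt)
    bfsLoop L f st.1 st.2.1 st.2.2

def adjacent_check (student_lst : List (List Int)) : Bool :=
  let s0 := PySem.List.pyGetD student_lst 0 []
  let sx := PySem.List.pyGetD s0 0 0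
  let sy := PySem.List.pyGetD s0 1 0
  let checked := msetOne (List.replicate 5 (List.replicate 5 (0 : Int))) sx sy
  decide (6 ≤ bfsLoop student_lst 26 [(sx, sy)] checked 0)

-- ===== PORT B =====
def nbrHit (comp : PySem.Set (Int × Int)) (c : Int × Int) : Bool :=
  PySem.Set.contains comp (c.1 + 1, c.2) || PySem.Set.contains comp (c.1 - 1, c.2) ||
  PySem.Set.contains comp (c.1, c.2 + 1) || PySem.Set.contains comp (c.1, c.2 - 1)

def sweep (cells comp : PySem.Set (Int × Int)) : PySem.Set (Int × Int) :=
  PySem.Set.union comp (cells.filter (nbrHit comp))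

-- 'for _ in range(len(student_lst))'
def sweeps (cells : PySem.Set (Int × Int)) : Nat → PySem.Set (Int × Int) → PySem.Set (Int × Int)
  | 0, comp => comp
  | n + 1, comp => sweeps cells n (sweep cells comp)

def adjacent_check_alt (student_lst : List (List Int)) : Bool :=
  let s0 := PySem.List.pyGetD student_lst 0 []
  let cells : PySem.Set (Int × Int) :=
    PySem.Set.ofList ((student_lst.filter (fun s => s.length == 2)).map
      (fun s => (PySem.List.pyGetD s 0 0, PySem.List.pyGetD s 1 0)))
  let comp := sweeps cells student_lst.length
      (PySem.Set.ofList [(PySem.List.pyGetD s0 0 0, PySem.List.pyGetD s0 1 0)])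
  decide (7 ≤ PySem.Set.len comp)

-- ===== PRECONDITION & SPEC =====
-- a coordinate pair is either on the 5x5 board or not orthogonally adjacent to it (off the
-- surrounding "ring"), so A's BFS can never index the checked matrix outside the board through it
def GoodPair (x y : Int) : Prop :=
  (0 ≤ x ∧ x < 5 ∧ 0 ≤ y ∧ y < 5) ∨
  (¬((x = -1 ∨ x = 5) ∧ 0 ≤ y ∧ y < 5) ∧ ¬((y = -1 ∨ y = 5) ∧ 0 ≤ x ∧ x < 5))

-- Pre_ excludes the inputs where A raises (empty list, first element not a pair, BFS indexing
-- row/column 5) and the inputs whose value A only produces through Python's negative-index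
-- wraparound into the checked matrix: it admits a nonempty list whose first element is a pair
-- and EITHER the start is on the board and every pair element is GoodPair (the run stays on the
-- board) OR the start lies in [-5,4]^2 and no pair element is orthogonally adjacent to it (the
-- BFS finds nothing and both programs answer False).
def Pre_adjacent_check (student_lst : List (List Int)) : Prop :=
  student_lst ≠ [] ∧ (student_lst.getD 0 []).length = 2 ∧
  ((0 ≤ (student_lst.getD 0 []).getD 0 0 ∧ (student_lst.getD 0 []).getD 0 0 < 5 ∧
    0 ≤ (student_lst.getD 0 []).getD 1 0 ∧ (student_lst.getD 0 []).getD 1 0 < 5 ∧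
    ∀ s ∈ student_lst, s.length = 2 → GoodPair (s.getD 0 0) (s.getD 1 0)) ∨
   (-5 ≤ (student_lst.getD 0 []).getD 0 0 ∧ (student_lst.getD 0 []).getD 0 0 ≤ 4 ∧
    -5 ≤ (student_lst.getD 0 []).getD 1 0 ∧ (student_lst.getD 0 []).getD 1 0 ≤ 4 ∧
    ∀ s ∈ student_lst, s.length = 2 →
      (s.getD 0 0 - (student_lst.getD 0 []).getD 0 0).natAbs +
      (s.getD 1 0 - (student_lst.getD 0 []).getD 1 0).natAbs ≠ 1))
instance (student_lst : List (List Int)) : Decidable (Pre_adjacent_check student_lst) := by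
  unfold Pre_adjacent_check GoodPair; infer_instance

def pvWitness_adjacent_check : List (List Int) :=
  [[0, 0], [0, 1], [0, 2], [0, 3], [0, 4], [1, 4], [2, 4]]

def Spec_adjacent_check (student_lst : List (List Int)) (out : Bool) : Prop := out = adjacent_check_alt student_lst
instance (student_lst : List (List Int)) (out : Bool) : Decidable (Spec_adjacent_check student_lst out) := by unfold Spec_adjacent_check; infer_instance

-- ===== CLAIM (what is proved, stated in full; the proofs are below) =====
def Claim_equal_adjacent_check : Prop := ∀ (student_lst : List (List Int)), Dom_adjacent_check student_lst → Pre_adjacent_check student_lst → Spec_adjacent_check student_lst (adjacent_check student_lst)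

-- ===== LEMMAS AND PROOFS =====

-- 4-neighbour adjacency on the integer grid
def Adj (a b : Int × Int) : Prop :=
  (b.1 = a.1 + 1 ∧ b.2 = a.2) ∨ (b.1 = a.1 - 1 ∧ b.2 = a.2) ∨
  (b.1 = a.1 ∧ b.2 = a.2 + 1) ∨ (b.1 = a.1 ∧ b.2 = a.2 - 1)

-- connectivity through selected students, from the start cell
inductive Reach (L : List (List Int)) (s : Int × Int) : Int × Int → Prop
  | refl : Reach L s s
  | step {b c : Int × Int} : Reach L s b → Adj b c → [c.1, c.2] ∈ L → Reach L s c

def InG (c : Int × Int) : Prop := 0 ≤ c.1 ∧ c.1 < 5 ∧ 0 ≤ c.2 ∧ c.2 < 5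

def grid : List (Int × Int) :=
  (PySem.List.pyRange 0 5 1).flatMap (fun i => (PySem.List.pyRange 0 5 1).map (fun j => (i, j)))

def Shape (M : List (List Int)) : Prop := M.length = 5 ∧ ∀ r ∈ M, r.length = 5

def mlist (M : List (List Int)) : List (Int × Int) := grid.filter (fun c => mget M c.1 c.2 != 0)


def Marked (M : List (List Int)) (c : Int × Int) : Prop := mget M c.1 c.2 ≠ 0

-- grid facts
lemma mem_grid (c : Int × Int) : c ∈ grid ↔ InG c := by
  obtain ⟨x, y⟩ := c
  simp only [grid, List.mem_flatMap, List.mem_map, PySem.List.mem_pyRange_one, InG, Prod.mk.injEq]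
  constructor
  · rintro ⟨i, hi, j, hj, rfl, rfl⟩; exact ⟨hi.1, hi.2, hj.1, hj.2⟩
  · rintro ⟨h1, h2, h3, h4⟩; exact ⟨x, ⟨h1, h2⟩, y, ⟨h3, h4⟩, rfl, rfl⟩
lemma nodup_grid : grid.Nodup := by decide
lemma length_grid : grid.length = 25 := by decide
lemma mem_mlist (M : List (List Int)) (c : Int × Int) : c ∈ mlist M ↔ InG c ∧ Marked M c := by
  simp [mlist, List.mem_filter, mem_grid, Marked]
lemma nodup_mlist (M : List (List Int)) : (mlist M).Nodup := nodup_grid.filter _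
lemma mlist_length_le (M : List (List Int)) : (mlist M).length ≤ 25 := by
  simpa [length_grid] using List.length_filter_le (fun c => mget M c.1 c.2 != 0) grid

-- matrix lemmas
lemma row_len (M : List (List Int)) (hM : Shape M) {x : Int} (h0 : 0 ≤ x) (h5 : x < 5) :
    (PySem.List.pyGetD M x []).length = 5 := by
  have hx : x < (M.length : Int) := by rw [hM.1]; exact_mod_cast h5
  rw [PySem.List.pyGetD_eq_getElem M [] h0 hx]
  exact hM.2 _ (List.getElem_mem _)

lemma shape_msetOne (M : List (List Int)) (a : Int × Int) (hM : Shape M) (ha : InG a) :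
    Shape (msetOne M a.1 a.2) := by
  obtain ⟨h1, h2, h3, h4⟩ := ha
  constructor
  · rw [msetOne, PySem.List.pySetD_of_nonneg _ _ h1, List.length_set, hM.1]
  · intro r hr
    rw [msetOne, PySem.List.pySetD_of_nonneg _ _ h1] at hr
    rcases List.mem_or_eq_of_mem_set hr with hr | rfl
    · exact hM.2 r hr
    · rw [PySem.List.pySetD_of_nonneg _ _ h3, List.length_set]
      exact row_len M hM h1 h2
lemma mget_msetOne (M : List (List Int)) (ax ay cx cy : Int) (hM : Shape M)
    (ha1 : 0 ≤ ax) (ha2 : ax < 5) (ha3 : 0 ≤ ay) (ha4 : ay < 5)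
    (hc1 : 0 ≤ cx) (hc2 : cx < 5) (hc3 : 0 ≤ cy) (hc4 : cy < 5) :
    mget (msetOne M ax ay) cx cy = if (cx, cy) = (ax, ay) then 1 else mget M cx cy := by
  have hrl := row_len M hM ha1 ha2
  have hrl2 := row_len M hM hc1 hc2
  unfold mget msetOne
  rw [PySem.List.pySetD_of_nonneg _ _ ha1, PySem.List.pySetD_of_nonneg _ _ ha3]
  have hlen : ((M.set ax.toNat ((PySem.List.pyGetD M ax []).set ay.toNat 1)).length : Int) = 5 := by
    simp [List.length_set, hM.1]
  rw [PySem.List.pyGetD_eq_getElem _ [] hc1 (by omega)]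
  by_cases hax : ax = cx
  · subst hax
    rw [List.getElem_set_self (by rw [List.length_set, hM.1]; omega)]
    rw [PySem.List.pyGetD_eq_getElem _ 0 hc3
      (by rw [show ((PySem.List.pyGetD M ax []).set ay.toNat 1).length = 5 by
            rw [List.length_set, hrl]]; omega)]
    by_cases hay : ay = cy
    · subst hay
      rw [List.getElem_set_self (by rw [List.length_set, hrl]; omega)]
      rw [if_pos rfl]
    · rw [List.getElem_set_ne (by omega)]
      rw [if_neg (by simp only [Prod.mk.injEq, not_and]; intro _; omega)]
      rw [← PySem.List.pyGetD_eq_getElem _ 0 hc3 (by rw [hrl2]; omega)]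
  · rw [List.getElem_set_ne (by omega)]
    rw [if_neg (by simp only [Prod.mk.injEq, not_and]; intro h; omega)]
    rw [← PySem.List.pyGetD_eq_getElem M [] hc1 (by rw [hM.1]; omega)]

lemma mget_msetOne2 (M : List (List Int)) (a c : Int × Int) (hM : Shape M) (ha : InG a) (hc : InG c) :
    mget (msetOne M a.1 a.2) c.1 c.2 = if c = a then 1 else mget M c.1 c.2 := by
  obtain ⟨ha1, ha2, ha3, ha4⟩ := ha
  obtain ⟨hc1, hc2, hc3, hc4⟩ := hc
  rw [mget_msetOne M a.1 a.2 c.1 c.2 hM ha1 ha2 ha3 ha4 hc1 hc2 hc3 hc4]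

lemma filter_length_succ {α : Type} [DecidableEq α] (p q : α → Bool) (a : α)
    (hpa : p a = false) :
    ∀ l : List α, l.Nodup → a ∈ l → (∀ x ∈ l, (q x = true ↔ (x = a ∨ p x = true))) →
    (l.filter q).length = (l.filter p).length + 1 := by
  intro l
  induction l with
  | nil => intro _ ha _; cases ha
  | cons h t ih =>
    intro hnd ha hq
    have hnt : h ∉ t := (List.nodup_cons.mp hnd).1
    rcases List.mem_cons.mp ha with rfl | hat
    · have hqh : q a = true := (hq a (by simp)).mpr (Or.inl rfl)
      rw [List.filter_cons_of_pos hqh, List.filter_cons_of_neg (by simp [hpa])]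
      simp only [List.length_cons, Nat.add_right_cancel_iff]
      have hfe : t.filter q = t.filter p := by
        apply List.filter_congr
        intro x hx
        have hxa : x ≠ a := fun e => hnt (e ▸ hx)
        have h1 := hq x (List.mem_cons_of_mem _ hx)
        exact Bool.eq_iff_iff.mpr (by rw [h1]; simp [hxa])
      rw [hfe]
    · have hne : h ≠ a := fun e => hnt (e ▸ hat)
      have hqh : q h = p h := by
        have h1 := hq h (by simp)
        exact Bool.eq_iff_iff.mpr (by rw [h1]; simp [hne])
      have ihr := ih (List.nodup_cons.mp hnd).2 hat (fun x hx => hq x (List.mem_cons_of_mem _ hx))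
      by_cases hph : p h = true
      · rw [List.filter_cons_of_pos (hqh ▸ hph), List.filter_cons_of_pos hph]
        simp only [List.length_cons]; omega
      · rw [List.filter_cons_of_neg (by simp_all), List.filter_cons_of_neg hph]
        exact ihr

lemma mlist_msetOne (M : List (List Int)) (a : Int × Int) (hM : Shape M) (ha : InG a)
    (h0 : mget M a.1 a.2 = 0) :
    (mlist (msetOne M a.1 a.2)).length = (mlist M).length + 1 := by
  apply filter_length_succ (fun c => mget M c.1 c.2 != 0) _ a (by simp [h0]) grid nodup_grid
    (mem_grid a |>.mpr ha)
  intro x hx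
  rw [mget_msetOne2 M a x hM ha ((mem_grid x).mp hx)]
  by_cases hxa : x = a
  · simp [hxa]
  · simp [hxa]

-- adjacency
lemma adj_char (a n : Int × Int) :
    Adj a n ↔ (n = (a.1 + 1, a.2) ∨ n = (a.1 - 1, a.2) ∨ n = (a.1, a.2 + 1) ∨ n = (a.1, a.2 - 1)) := by
  obtain ⟨x, y⟩ := a; obtain ⟨u, v⟩ := n; simp only [Adj, Prod.mk.injEq]
lemma adj_rev (p c : Int × Int) :
    Adj p c ↔ (p = (c.1 + 1, c.2) ∨ p = (c.1 - 1, c.2) ∨ p = (c.1, c.2 + 1) ∨ p = (c.1, c.2 - 1)) := by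
  obtain ⟨x, y⟩ := p; obtain ⟨u, v⟩ := c; simp only [Adj, Prod.mk.injEq]; omega

-- any pair of L that is adjacent to an on-board cell is itself on the board
def SafeL (L : List (List Int)) : Prop :=
  ∀ a n : Int × Int, InG a → Adj a n → [n.1, n.2] ∈ L → InG n

lemma safe_of_good {L : List (List Int)}
    (hg : ∀ s ∈ L, s.length = 2 → GoodPair (s.getD 0 0) (s.getD 1 0)) : SafeL L := by
  intro a n ha hA hmem
  have hgp := hg [n.1, n.2] hmem rfl
  simp only [List.getD] at hgp
  rcases hgp with hgp | hgp
  · exact ⟨hgp.1, hgp.2.1, hgp.2.2.1, hgp.2.2.2⟩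
  · obtain ⟨ha1, ha2, ha3, ha4⟩ := ha
    rcases (adj_char a n).mp hA with rfl | rfl | rfl | rfl <;>
      refine ⟨?_, ?_, ?_, ?_⟩ <;> simp at hgp ⊢ <;> omega

lemma reach_InG {L : List (List Int)} {s c : Int × Int} (hS : SafeL L)
    (hs : InG s) (h : Reach L s c) : InG c := by
  induction h with
  | refl => exact hs
  | @step b c hR hA hm ih => exact hS b c ih hA hm

-- ===== A-side invariant =====
structure Mid (L : List (List Int)) (s xy : Int × Int) (X : Nat)
    (st : List (Int × Int) × List (List Int) × Int) : Prop where
  shape : Shape st.2.1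
  qmk : ∀ c ∈ st.1, InG c ∧ Marked st.2.1 c
  sound : ∀ c, InG c → Marked st.2.1 c → Reach L s c
  pend : ∀ c, InG c → Marked st.2.1 c →
    c = xy ∨ c ∈ st.1 ∨ ∀ n, Adj c n → [n.1, n.2] ∈ L → Marked st.2.1 n
  count : st.2.2 + 1 = ((mlist st.2.1).length : Int)
  smk : InG s ∧ Marked st.2.1 s
  xyp : InG xy ∧ Marked st.2.1 xy ∧ Reach L s xy
  fuelv : st.1.length + 25 ≤ X + (mlist st.2.1).length

def pushN (L : List (List Int)) (n : Int × Int)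
    (st : List (Int × Int) × List (List Int) × Int) :
    List (Int × Int) × List (List Int) × Int :=
  if [n.1, n.2] ∈ L ∧ mget st.2.1 n.1 n.2 = 0 then
    (st.1 ++ [n], msetOne st.2.1 n.1 n.2, st.2.2 + 1) else st

lemma step1 (L : List (List Int)) (s xy : Int × Int) (X : Nat)
    (st : List (Int × Int) × List (List Int) × Int) (n : Int × Int)
    (hS : SafeL L) (hA : Adj xy n) (hm : Mid L s xy X st) :
    Mid L s xy X (pushN L n st) ∧
    (∀ c, InG c → Marked st.2.1 c → Marked (pushN L n st).2.1 c) ∧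
    ([n.1, n.2] ∈ L → Marked (pushN L n st).2.1 n) ∧
    (∀ c ∈ st.1, c ∈ (pushN L n st).1) := by
  unfold pushN
  by_cases hcond : [n.1, n.2] ∈ L ∧ mget st.2.1 n.1 n.2 = 0
  · simp only [if_pos hcond]
    obtain ⟨hmem, h0⟩ := hcond
    have hnG : InG n := hS xy n hm.xyp.1 hA hmem
    have hsh := hm.shape
    have hMk : ∀ c, InG c → (Marked (msetOne st.2.1 n.1 n.2) c ↔ (c = n ∨ Marked st.2.1 c)) := by
      intro c hc
      unfold Marked
      rw [mget_msetOne2 st.2.1 n c hsh hnG hc]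
      by_cases hcn : c = n
      · simp [hcn]
      · simp [hcn]
    have hmlen := mlist_msetOne st.2.1 n hsh hnG h0
    refine ⟨?_, ?_, ?_, ?_⟩
    · refine ⟨shape_msetOne _ _ hsh hnG, ?_, ?_, ?_, ?_, ?_, ?_, ?_⟩
      · intro c hc
        rcases List.mem_append.mp hc with hc | hc
        · obtain ⟨hG, hMc⟩ := hm.qmk c hc
          exact ⟨hG, (hMk c hG).mpr (Or.inr hMc)⟩
        · rw [List.mem_singleton.mp hc]
          exact ⟨hnG, (hMk n hnG).mpr (Or.inl rfl)⟩
      · intro c hG hMc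
        rcases (hMk c hG).mp hMc with rfl | hold
        · exact Reach.step hm.xyp.2.2 hA hmem
        · exact hm.sound c hG hold
      · intro c hG hMc
        rcases (hMk c hG).mp hMc with rfl | hold
        · exact Or.inr (Or.inl (List.mem_append.mpr (Or.inr (List.mem_singleton.mpr rfl))))
        · rcases hm.pend c hG hold with h | h | h
          · exact Or.inl h
          · exact Or.inr (Or.inl (List.mem_append_left _ h))
          · refine Or.inr (Or.inr ?_)
            intro m hAm hmm
            have hmG : InG m := hS c m hG hAm hmm
            exact (hMk m hmG).mpr (Or.inr (h m hAm hmm))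
      · have := hm.count
        simp only [hmlen]
        push_cast
        push_cast at this
        omega
      · exact ⟨hm.smk.1, (hMk s hm.smk.1).mpr (Or.inr hm.smk.2)⟩
      · exact ⟨hm.xyp.1, (hMk xy hm.xyp.1).mpr (Or.inr hm.xyp.2.1), hm.xyp.2.2⟩
      · have := hm.fuelv
        simp only [List.length_append, List.length_singleton, hmlen]
        omega
    · intro c hc hMc
      exact (hMk c hc).mpr (Or.inr hMc)
    · intro _
      exact (hMk n hnG).mpr (Or.inl rfl)
    · intro c hc
      exact List.mem_append_left _ hc
  · simp only [if_neg hcond]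
    refine ⟨hm, fun c _ h => h, ?_, fun c hc => hc⟩
    intro hmem h0
    exact hcond ⟨hmem, h0⟩

lemma fold4 (L : List (List Int)) (s : Int × Int) (x y : Int)
    (q : List (Int × Int)) (M : List (List Int)) (cnt : Int) (X : Nat)
    (hS : SafeL L) (hm : Mid L s (x, y) X (q, M, cnt)) :
    Mid L s (x, y) X ((PySem.List.pyRange 0 4 1).foldl (stepDir L x y) (q, M, cnt)) ∧
    (∀ n, Adj (x, y) n → [n.1, n.2] ∈ L →
      Marked ((PySem.List.pyRange 0 4 1).foldl (stepDir L x y) (q, M, cnt)).2.1 n) := by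
  have hr4 : PySem.List.pyRange 0 4 1 = [0, 1, 2, 3] := by decide
  rw [hr4]
  simp only [List.foldl_cons, List.foldl_nil]
  have adj0 : Adj (x, y) (x + 1, y + 0) := Or.inl ⟨rfl, by ring⟩
  have adj1 : Adj (x, y) (x + 0, y + 1) := Or.inr (Or.inr (Or.inl ⟨by ring, rfl⟩))
  have adj2 : Adj (x, y) (x + -1, y + 0) := Or.inr (Or.inl ⟨by ring, by ring⟩)
  have adj3 : Adj (x, y) (x + 0, y + -1) := Or.inr (Or.inr (Or.inr ⟨by ring, by ring⟩))
  obtain ⟨m1, mono1, mark1, _⟩ := step1 L s (x, y) X (q, M, cnt) (x + 1, y + 0) hS adj0 hm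
  obtain ⟨m2, mono2, mark2, _⟩ := step1 L s (x, y) X _ (x + 0, y + 1) hS adj1 m1
  obtain ⟨m3, mono3, mark3, _⟩ := step1 L s (x, y) X _ (x + -1, y + 0) hS adj2 m2
  obtain ⟨m4, mono4, mark4, _⟩ := step1 L s (x, y) X _ (x + 0, y + -1) hS adj3 m3
  have heq : stepDir L x y (stepDir L x y (stepDir L x y (stepDir L x y (q, M, cnt) 0) 1) 2) 3
      = pushN L (x + 0, y + -1) (pushN L (x + -1, y + 0)
          (pushN L (x + 0, y + 1) (pushN L (x + 1, y + 0) (q, M, cnt)))) := rfl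
  rw [heq]
  refine ⟨m4, ?_⟩
  intro n hAdj hmem
  have hnG : InG n := hS (x, y) n hm.xyp.1 hAdj hmem
  rcases (adj_char (x, y) n).mp hAdj with rfl | rfl | rfl | rfl
  · have h1 : Marked (pushN L (x + 1, y + 0) (q, M, cnt)).2.1 (x + 1, y + 0) :=
      mark1 (by simpa using hmem)
    have hG : InG ((x : Int) + 1, y + 0) := by simpa using hnG
    have := mono4 _ hG (mono3 _ hG (mono2 _ hG h1))
    simpa [Marked] using this
  · have h1 := mark3 (by simpa using hmem)
    have hG : InG ((x : Int) + -1, y + 0) := by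
      simpa [InG, show x + -1 = x - 1 from by ring] using hnG
    have := mono4 _ hG h1
    simpa [Marked, show x + -1 = x - 1 from by ring] using this
  · have h1 := mark2 (by simpa using hmem)
    have hG : InG ((x : Int) + 0, y + 1) := by simpa using hnG
    have := mono4 _ hG (mono3 _ hG h1)
    simpa [Marked] using this
  · have h1 := mark4 (by simpa [show y + -1 = y - 1 from by ring] using hmem)
    simpa [Marked, show y + -1 = y - 1 from by ring] using h1

structure InvA (L : List (List Int)) (s : Int × Int) (f : Nat)
    (q : List (Int × Int)) (M : List (List Int)) (cnt : Int) : Prop where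
  shape : Shape M
  qmk : ∀ c ∈ q, InG c ∧ Marked M c
  sound : ∀ c, InG c → Marked M c → Reach L s c
  closedq : ∀ c, InG c → Marked M c → c ∈ q ∨ ∀ n, Adj c n → [n.1, n.2] ∈ L → Marked M n
  count : cnt + 1 = ((mlist M).length : Int)
  smk : InG s ∧ Marked M s
  fuelv : q.length + 25 ≤ f + (mlist M).length

lemma invA_done {L : List (List Int)} {s : Int × Int} {f : Nat} {M : List (List Int)} {cnt : Int}
    (hS : SafeL L) (inv : InvA L s f [] M cnt) :
    ∀ c, c ∈ mlist M ↔ Reach L s c := by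
  have hall : ∀ c, Reach L s c → Marked M c := by
    intro c hr
    induction hr with
    | refl => exact inv.smk.2
    | @step b c hR hA hmm ih =>
      rcases inv.closedq b (reach_InG hS inv.smk.1 hR) ih with hq | hcl
      · cases hq
      · exact hcl c hA hmm
  intro c
  rw [mem_mlist]
  exact ⟨fun h => inv.sound c h.1 h.2, fun hr => ⟨reach_InG hS inv.smk.1 hr, hall c hr⟩⟩

lemma bfs_main {L : List (List Int)} {s : Int × Int} (hS : SafeL L) :
    ∀ (f : Nat) (q : List (Int × Int)) (M : List (List Int)) (cnt : Int), InvA L s f q M cnt →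
    ∃ ml : List (Int × Int), ml.Nodup ∧ (∀ c, c ∈ ml ↔ Reach L s c) ∧
      bfsLoop L f q M cnt + 1 = (ml.length : Int) := by
  intro f
  induction f with
  | zero =>
    intro q M cnt inv
    have h25 := mlist_length_le M
    have hq : q = [] := List.eq_nil_of_length_eq_zero (by have := inv.fuelv; omega)
    subst hq
    exact ⟨mlist M, nodup_mlist M, invA_done hS inv, by simpa [bfsLoop] using inv.count⟩
  | succ f ih =>
    intro q M cnt inv
    match q with
    | [] =>
      exact ⟨mlist M, nodup_mlist M, invA_done hS inv, by simpa [bfsLoop] using inv.count⟩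
    | (x, y) :: q =>
      have hxy := inv.qmk (x, y) List.mem_cons_self
      have hmid : Mid L s (x, y) f (q, M, cnt) :=
        { shape := inv.shape
          qmk := fun c hc => inv.qmk c (List.mem_cons_of_mem _ hc)
          sound := inv.sound
          pend := fun c hG hM => by
            rcases inv.closedq c hG hM with hq | hcl
            · rcases List.mem_cons.mp hq with rfl | hq2
              · exact Or.inl rfl
              · exact Or.inr (Or.inl hq2)
            · exact Or.inr (Or.inr hcl)
          count := inv.count
          smk := inv.smk
          xyp := ⟨hxy.1, hxy.2, inv.sound _ hxy.1 hxy.2⟩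
          fuelv := by
            have := inv.fuelv
            simp only [List.length_cons] at this
            show q.length + 25 ≤ f + (mlist M).length
            omega }
      obtain ⟨hmid2, hnbr⟩ := fold4 L s x y q M cnt f hS hmid
      have hinv2 : InvA L s f ((PySem.List.pyRange 0 4 1).foldl (stepDir L x y) (q, M, cnt)).1
          ((PySem.List.pyRange 0 4 1).foldl (stepDir L x y) (q, M, cnt)).2.1
          ((PySem.List.pyRange 0 4 1).foldl (stepDir L x y) (q, M, cnt)).2.2 :=
        { shape := hmid2.shape
          qmk := hmid2.qmk
          sound := hmid2.sound
          closedq := fun c hG hM => by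
            rcases hmid2.pend c hG hM with rfl | h | h
            · exact Or.inr hnbr
            · exact Or.inl h
            · exact Or.inr h
          count := hmid2.count
          smk := hmid2.smk
          fuelv := hmid2.fuelv }
      have hres := ih _ _ _ hinv2
      have heq : bfsLoop L (f + 1) ((x, y) :: q) M cnt
          = bfsLoop L f ((PySem.List.pyRange 0 4 1).foldl (stepDir L x y) (q, M, cnt)).1
              ((PySem.List.pyRange 0 4 1).foldl (stepDir L x y) (q, M, cnt)).2.1
              ((PySem.List.pyRange 0 4 1).foldl (stepDir L x y) (q, M, cnt)).2.2 := rfl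
      rw [heq]
      exact hres

-- ===== B-side =====
def cellsOf (L : List (List Int)) : PySem.Set (Int × Int) :=
  PySem.Set.ofList ((L.filter (fun s => s.length == 2)).map
    (fun s => (PySem.List.pyGetD s 0 0, PySem.List.pyGetD s 1 0)))

lemma mem_cellsOf {L : List (List Int)} (c : Int × Int) :
    c ∈ cellsOf L ↔ [c.1, c.2] ∈ L := by
  simp only [cellsOf, PySem.Set.mem_ofList, List.mem_map, List.mem_filter, beq_iff_eq]
  constructor
  · rintro ⟨sl, ⟨hsl, hlen⟩, he⟩
    obtain ⟨a, b, rfl⟩ := List.length_eq_two.mp hlen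
    have : (a, b) = c := he
    rw [← this]; exact hsl
  · intro h
    exact ⟨[c.1, c.2], ⟨h, rfl⟩, rfl⟩

lemma nbrHit_iff (comp : PySem.Set (Int × Int)) (c : Int × Int) :
    nbrHit comp c = true ↔ ∃ p ∈ comp, Adj p c := by
  simp only [nbrHit, Bool.or_eq_true, PySem.Set.contains_iff]
  constructor
  · rintro (((h | h) | h) | h)
    · exact ⟨_, h, (adj_rev _ _).mpr (Or.inl rfl)⟩
    · exact ⟨_, h, (adj_rev _ _).mpr (Or.inr (Or.inl rfl))⟩
    · exact ⟨_, h, (adj_rev _ _).mpr (Or.inr (Or.inr (Or.inl rfl)))⟩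
    · exact ⟨_, h, (adj_rev _ _).mpr (Or.inr (Or.inr (Or.inr rfl)))⟩
  · rintro ⟨p, hp, hA⟩
    rcases (adj_rev p c).mp hA with rfl | rfl | rfl | rfl
    · exact Or.inl (Or.inl (Or.inl hp))
    · exact Or.inl (Or.inl (Or.inr hp))
    · exact Or.inl (Or.inr hp)
    · exact Or.inr hp

lemma mem_sweep (cells comp : PySem.Set (Int × Int)) (x : Int × Int) :
    x ∈ sweep cells comp ↔ x ∈ comp ∨ (x ∈ cells ∧ nbrHit comp x = true) := by
  simp [sweep, PySem.Set.mem_union, List.mem_filter]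

lemma nodup_sweep (cells comp : PySem.Set (Int × Int)) (h : comp.Nodup) :
    (sweep cells comp).Nodup := PySem.Set.nodup_union _ _ h

lemma sweep_eq_of_closed (cells comp : PySem.Set (Int × Int))
    (h : ∀ x ∈ cells, nbrHit comp x = true → x ∈ comp) : sweep cells comp = comp := by
  have he : sweep cells comp
      = comp ++ (PySem.Set.ofList (cells.filter (nbrHit comp))).filter (fun y => !comp.contains y) :=
    PySem.Set.update_eq_append_filter comp _
  rw [he, List.filter_eq_nil_iff.mpr, List.append_nil]
  intro y hy
  rw [PySem.Set.mem_ofList] at hy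
  obtain ⟨hy1, hy2⟩ := List.mem_filter.mp hy
  simp [h y hy1 hy2]

lemma len_sweep_lt (cells comp : PySem.Set (Int × Int)) (x : Int × Int)
    (hx : x ∈ cells) (hn : nbrHit comp x = true) (hnm : x ∉ comp) :
    comp.length + 1 ≤ (sweep cells comp).length := by
  have he : sweep cells comp
      = comp ++ (PySem.Set.ofList (cells.filter (nbrHit comp))).filter (fun y => !comp.contains y) :=
    PySem.Set.update_eq_append_filter comp _
  rw [he, List.length_append]
  have hmem : x ∈ (PySem.Set.ofList (cells.filter (nbrHit comp))).filter (fun y => !comp.contains y) := by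
    refine List.mem_filter.mpr ⟨(PySem.Set.mem_ofList _ _).mpr (List.mem_filter.mpr ⟨hx, hn⟩), ?_⟩
    simp [hnm]
  have := List.length_pos_of_mem hmem
  omega

lemma sweeps_of_closed (cells : PySem.Set (Int × Int))
    (comp : PySem.Set (Int × Int)) (n : Nat)
    (h : ∀ x ∈ cells, nbrHit comp x = true → x ∈ comp) : sweeps cells n comp = comp := by
  induction n with
  | zero => rfl
  | succ n ih => simp only [sweeps, sweep_eq_of_closed cells comp h]; exact ih

structure InvB (L : List (List Int)) (s : Int × Int) (comp : List (Int × Int)) : Prop where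
  nd : comp.Nodup
  smem : s ∈ comp
  sound : ∀ c ∈ comp, Reach L s c
  sub : ∀ c ∈ comp, c ∈ cellsOf L

def ClosedB (L : List (List Int)) (comp : List (Int × Int)) : Prop :=
  ∀ c ∈ cellsOf L, nbrHit comp c = true → c ∈ comp

lemma invB_sweep {L : List (List Int)} {s : Int × Int} {comp : List (Int × Int)}
    (h : InvB L s comp) : InvB L s (sweep (cellsOf L) comp) := by
  refine ⟨nodup_sweep _ _ h.nd, (mem_sweep _ _ _).mpr (Or.inl h.smem), ?_, ?_⟩
  · intro c hc
    rcases (mem_sweep _ _ _).mp hc with hc | ⟨hcell, hnbr⟩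
    · exact h.sound c hc
    · obtain ⟨p, hp, hA⟩ := (nbrHit_iff _ _).mp hnbr
      exact Reach.step (h.sound p hp) hA ((mem_cellsOf c).mp hcell)
  · intro c hc
    rcases (mem_sweep _ _ _).mp hc with hc | ⟨hcell, _⟩
    · exact h.sub c hc
    · exact hcell

lemma progressB {L : List (List Int)} {s : Int × Int} :
    ∀ (n : Nat) (comp : List (Int × Int)), InvB L s comp →
    InvB L s (sweeps (cellsOf L) n comp) ∧
      (ClosedB L (sweeps (cellsOf L) n comp) ∨ comp.length + n ≤ (sweeps (cellsOf L) n comp).length) := by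
  intro n
  induction n with
  | zero => exact fun comp h => ⟨h, Or.inr (by simp [sweeps])⟩
  | succ n ih =>
    intro comp h
    simp only [sweeps]
    by_cases hcl : ClosedB L comp
    · have he : sweep (cellsOf L) comp = comp := sweep_eq_of_closed _ _ hcl
      have hs : sweeps (cellsOf L) n (sweep (cellsOf L) comp) = comp := by
        rw [he]; exact sweeps_of_closed _ _ _ hcl
      rw [hs]; exact ⟨h, Or.inl hcl⟩
    · simp only [ClosedB, not_forall] at hcl
      obtain ⟨x, hx, hn, hnm⟩ := hcl
      obtain ⟨ih1, ih2⟩ := ih (sweep (cellsOf L) comp) (invB_sweep h)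
      refine ⟨ih1, ?_⟩
      rcases ih2 with hcl2 | hlen
      · exact Or.inl hcl2
      · have h1 := len_sweep_lt (cellsOf L) comp x hx hn hnm
        exact Or.inr (by omega)

lemma b_final {L : List (List Int)} {s : Int × Int}
    (h : InvB L s [s]) :
    (sweeps (cellsOf L) L.length [s]).Nodup ∧
    (∀ c, c ∈ sweeps (cellsOf L) L.length [s] ↔ Reach L s c) := by
  obtain ⟨h1, h2⟩ := progressB L.length [s] h
  have hcl : ClosedB L (sweeps (cellsOf L) L.length [s]) := by
    rcases h2 with hcl | hlen
    · exact hcl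
    · exfalso
      have hsub : sweeps (cellsOf L) L.length [s] ⊆ cellsOf L := fun c hc => h1.sub c hc
      have hle : (sweeps (cellsOf L) L.length [s]).length ≤ (cellsOf L).length :=
        (List.subperm_of_subset h1.nd hsub).length_le
      have hle2 : (cellsOf L).length ≤ L.length := by
        have h1 := PySem.Set.length_ofList_le
          ((L.filter (fun sl => sl.length == 2)).map
            (fun sl => (PySem.List.pyGetD sl 0 0, PySem.List.pyGetD sl 1 0)))
        have h2 := List.length_filter_le (fun sl => sl.length == 2) L
        simp only [cellsOf, List.length_map] at h1 ⊢
        omega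
      simp at hlen
      omega
  refine ⟨h1.nd, fun c => ⟨h1.sound c, ?_⟩⟩
  intro hr
  induction hr with
  | refl => exact h1.smem
  | step hR hA hm ih =>
    exact hcl _ ((mem_cellsOf _).mpr hm) ((nbrHit_iff _ _).mpr ⟨_, ih, hA⟩)

-- ===== VERDICT (by name: the statement is the Claim_ definition above) =====
lemma shape_R0 : Shape (List.replicate 5 (List.replicate 5 (0 : Int))) := by
  constructor
  · rfl
  · intro r hr
    rw [List.eq_of_mem_replicate hr]
    rfl

lemma mget_R0 (c : Int × Int) (hc : InG c) :
    mget (List.replicate 5 (List.replicate 5 (0 : Int))) c.1 c.2 = 0 := by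
  obtain ⟨cx, cy⟩ := c
  obtain ⟨h1, h2, h3, h4⟩ := hc
  unfold mget
  rw [PySem.List.pyGetD_eq_getElem _ [] h1 (by simp; omega), List.getElem_replicate,
      PySem.List.pyGetD_eq_getElem _ 0 h3 (by simp; omega), List.getElem_replicate]

lemma mlist_R0 : mlist (List.replicate 5 (List.replicate 5 (0 : Int))) = [] := by decide

theorem adjacent_check_spec : Claim_equal_adjacent_check := by
  intro L hDom hP
  obtain ⟨hne, hlen2, hbr⟩ := hP
  obtain ⟨a, t, rfl⟩ := List.exists_cons_of_ne_nil hne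
  have hget : (a :: t).getD 0 [] = a := rfl
  rw [hget] at hlen2 hbr
  obtain ⟨p, q2, rfl⟩ := List.length_eq_two.mp hlen2
  have ep : [p, q2].getD 0 0 = p := rfl
  have eq2 : [p, q2].getD 1 0 = q2 := rfl
  rw [ep, eq2] at hbr
  have hA : adjacent_check ([p, q2] :: t) = decide (6 ≤ bfsLoop ([p, q2] :: t) 26 [(p, q2)]
      (msetOne (List.replicate 5 (List.replicate 5 (0 : Int))) p q2) 0) := by
    simp only [adjacent_check, PySem.List.pyGetD_zero_cons]
    rfl
  have hget1 : PySem.List.pyGetD [p, q2] 1 0 = q2 := rfl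
  have hB : adjacent_check_alt ([p, q2] :: t)
      = decide ((7 : Int) ≤ ((sweeps (cellsOf ([p, q2] :: t)) ([p, q2] :: t).length [(p, q2)]).length : Int)) := by
    simp only [adjacent_check_alt, PySem.List.pyGetD_zero_cons, hget1]
    rfl
  show adjacent_check ([p, q2] :: t) = adjacent_check_alt ([p, q2] :: t)
  rw [hA, hB]
  rcases hbr with ⟨hb1, hb2, hb3, hb4, hgood⟩ | ⟨hx1, hx2, hx3, hx4, hiso⟩
  · -- main branch: the run stays on the board
    have hS : SafeL ([p, q2] :: t) := safe_of_good hgood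
    have hsG : InG (p, q2) := ⟨hb1, hb2, hb3, hb4⟩
    have hz := mget_R0
    have hcnt1 : (mlist (msetOne (List.replicate 5 (List.replicate 5 (0 : Int))) p q2)).length = 1 := by
      have := mlist_msetOne (List.replicate 5 (List.replicate 5 (0 : Int))) (p, q2)
        shape_R0 hsG (hz _ hsG)
      rw [mlist_R0] at this
      simpa using this
    have hM0marked : ∀ c, InG c →
        (Marked (msetOne (List.replicate 5 (List.replicate 5 (0 : Int))) p q2) c ↔ c = (p, q2)) := by
      intro c hc
      unfold Marked
      have he : mget (msetOne (List.replicate 5 (List.replicate 5 (0 : Int))) p q2) c.1 c.2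
          = if c = (p, q2) then 1 else mget (List.replicate 5 (List.replicate 5 (0 : Int))) c.1 c.2 :=
        mget_msetOne2 _ (p, q2) c shape_R0 hsG hc
      rw [he]
      by_cases hcp : c = (p, q2)
      · simp [hcp]
      · rw [if_neg hcp, hz c hc]
        simp [hcp]
    have hinv0 : InvA ([p, q2] :: t) (p, q2) 26 [(p, q2)]
        (msetOne (List.replicate 5 (List.replicate 5 (0 : Int))) p q2) 0 :=
      { shape := shape_msetOne _ (p, q2) shape_R0 hsG
        qmk := fun c hc => by
          rw [List.mem_singleton.mp hc]
          exact ⟨hsG, (hM0marked _ hsG).mpr rfl⟩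
        sound := fun c hG hM => by
          rw [(hM0marked c hG).mp hM]
          exact Reach.refl
        closedq := fun c hG hM => Or.inl (by rw [(hM0marked c hG).mp hM]; exact List.mem_singleton.mpr rfl)
        count := by rw [hcnt1]; norm_num
        smk := ⟨hsG, (hM0marked _ hsG).mpr rfl⟩
        fuelv := by rw [hcnt1]; simp }
    obtain ⟨ml, hnd, hmem, hcnt⟩ := bfs_main hS 26 [(p, q2)] _ 0 hinv0
    have hinvB : InvB ([p, q2] :: t) (p, q2) [(p, q2)] :=
      { nd := List.nodup_singleton _
        smem := List.mem_singleton.mpr rfl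
        sound := fun c hc => by rw [List.mem_singleton.mp hc]; exact Reach.refl
        sub := fun c hc => by
          rw [List.mem_singleton.mp hc]
          exact (mem_cellsOf (p, q2)).mpr List.mem_cons_self }
    obtain ⟨hndB, hmemB⟩ := b_final hinvB
    have hperm : ml.Perm (sweeps (cellsOf ([p, q2] :: t)) ([p, q2] :: t).length [(p, q2)]) :=
      (List.perm_ext_iff_of_nodup hnd hndB).mpr (fun c => (hmem c).trans (hmemB c).symm)
    have hlen := hperm.length_eq
    apply decide_eq_decide.mpr
    omega
  · -- isolated branch: the BFS never finds a neighbour; both sides answer False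
    have hnb : ∀ n : Int × Int, [n.1, n.2] ∈ ([p, q2] :: t) →
        (n.1 - p).natAbs + (n.2 - q2).natAbs ≠ 1 := by
      intro n hmem
      have := hiso [n.1, n.2] hmem rfl
      simpa [List.getD] using this
    have hpush : ∀ (n : Int × Int) (st : List (Int × Int) × List (List Int) × Int),
        (n.1 - p).natAbs + (n.2 - q2).natAbs = 1 → pushN ([p, q2] :: t) n st = st := by
      intro n st h1
      unfold pushN
      rw [if_neg]
      rintro ⟨hmem, -⟩
      exact hnb n hmem h1
    have hfold : (PySem.List.pyRange 0 4 1).foldl (stepDir ([p, q2] :: t) p q2)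
        ([], msetOne (List.replicate 5 (List.replicate 5 (0 : Int))) p q2, 0)
        = ([], msetOne (List.replicate 5 (List.replicate 5 (0 : Int))) p q2, 0) := by
      have hr4 : PySem.List.pyRange 0 4 1 = [0, 1, 2, 3] := by decide
      rw [hr4]
      simp only [List.foldl_cons, List.foldl_nil]
      have e0 : ∀ st : List (Int × Int) × List (List Int) × Int,
          stepDir ([p, q2] :: t) p q2 st 0 = pushN ([p, q2] :: t) (p + 1, q2 + 0) st := fun _ => rfl
      have e1 : ∀ st : List (Int × Int) × List (List Int) × Int,
          stepDir ([p, q2] :: t) p q2 st 1 = pushN ([p, q2] :: t) (p + 0, q2 + 1) st := fun _ => rfl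
      have e2 : ∀ st : List (Int × Int) × List (List Int) × Int,
          stepDir ([p, q2] :: t) p q2 st 2 = pushN ([p, q2] :: t) (p + -1, q2 + 0) st := fun _ => rfl
      have e3 : ∀ st : List (Int × Int) × List (List Int) × Int,
          stepDir ([p, q2] :: t) p q2 st 3 = pushN ([p, q2] :: t) (p + 0, q2 + -1) st := fun _ => rfl
      rw [e0, hpush _ _ (by omega), e1, hpush _ _ (by omega),
          e2, hpush _ _ (by omega), e3, hpush _ _ (by omega)]
    have hbfs : bfsLoop ([p, q2] :: t) 26 [(p, q2)]
        (msetOne (List.replicate 5 (List.replicate 5 (0 : Int))) p q2) 0 = 0 := by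
      have h1 : bfsLoop ([p, q2] :: t) 26 [(p, q2)]
          (msetOne (List.replicate 5 (List.replicate 5 (0 : Int))) p q2) 0
          = bfsLoop ([p, q2] :: t) 25
              ((PySem.List.pyRange 0 4 1).foldl (stepDir ([p, q2] :: t) p q2)
                ([], msetOne (List.replicate 5 (List.replicate 5 (0 : Int))) p q2, 0)).1
              ((PySem.List.pyRange 0 4 1).foldl (stepDir ([p, q2] :: t) p q2)
                ([], msetOne (List.replicate 5 (List.replicate 5 (0 : Int))) p q2, 0)).2.1
              ((PySem.List.pyRange 0 4 1).foldl (stepDir ([p, q2] :: t) p q2)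
                ([], msetOne (List.replicate 5 (List.replicate 5 (0 : Int))) p q2, 0)).2.2 := rfl
      rw [h1, hfold]
      rfl
    have hsw : sweeps (cellsOf ([p, q2] :: t)) ([p, q2] :: t).length [(p, q2)] = [(p, q2)] := by
      apply sweeps_of_closed
      intro x hx hn
      exfalso
      obtain ⟨pp, hpp, hAd⟩ := (nbrHit_iff _ _).mp hn
      rw [List.mem_singleton] at hpp
      subst hpp
      have h1 := hnb x ((mem_cellsOf x).mp hx)
      rcases (adj_char (p, q2) x).mp hAd with rfl | rfl | rfl | rfl <;> simp at h1 <;> omega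
    rw [hbfs, hsw]
    rfl
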